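-- pv_equiv track=rewrite | github.com/venturarome/svg-text-morph | services/configure_svg.py | nth_occurrence_index
-- ===== SOURCE A (Python) =====
-- def nth_occurrence_index(s: str, char: str, n: int) -> int:
--     """
--     Returns the index of the n-th occurrence of 'char' in 's'.
--     Returns -1 if 'char' doesn't occur n times.
--     """
--     count = 0
--     for index, c in enumerate(s):
--         if c == char:
--             count += 1
--             if count == n:
--                 return index
--     return -1
-- ===== SOURCE B (Python) =====
-- def nth_occurrence_index(s: str, char: str, n: int) -> int:
--     """
--     Returns the index of the n-th occurrence of 'char' in 's'.
--     Returns -1 if 'char' doesn't occur n times.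
--     """
--     # A single character of s can only equal 'char' when 'char' has length 1,
--     # so for any other 'char' there is no occurrence at all.
--     if len(char) != 1:
--         return -1
--     pos = -1
--     for _ in range(n):
--         pos = s.find(char, pos + 1)
--         if pos == -1:
--             return -1
--     return pos
-- ===== Notes on version B (the rewrite author's own statement) =====
-- stated objective: faster
-- what changed: B never compares characters itself: it repeatedly seeks with the library substring search str.find, advancing the start past each hit n times (after guarding len(char) != 1, where no occurrence is possible), instead of A's Python-level enumerate scan with a running counter.
import Mathlib
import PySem

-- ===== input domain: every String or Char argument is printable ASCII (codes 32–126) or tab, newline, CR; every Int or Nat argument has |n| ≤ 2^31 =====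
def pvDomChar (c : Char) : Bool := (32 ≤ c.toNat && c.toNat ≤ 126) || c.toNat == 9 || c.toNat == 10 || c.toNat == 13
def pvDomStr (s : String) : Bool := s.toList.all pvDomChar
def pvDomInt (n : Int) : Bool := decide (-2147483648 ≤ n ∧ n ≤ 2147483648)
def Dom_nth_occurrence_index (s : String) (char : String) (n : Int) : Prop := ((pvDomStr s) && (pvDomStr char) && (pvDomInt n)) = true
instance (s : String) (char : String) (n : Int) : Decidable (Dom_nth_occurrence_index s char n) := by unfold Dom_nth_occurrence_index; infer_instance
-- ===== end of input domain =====

-- B replaces A's counting character scan by repeated substring search (str.find with a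
-- moving start, n seeks), guarded by len(char) != 1 where no occurrence is possible;
-- objective: faster by a constant factor (library search instead of a per-character Python loop), measured.

-- ===== PORT A =====
-- A's loop: running counter over enumerate(s), early return on the n-th match.
def nthAuxA (char : String) (n : Int) : List Char → Int → Int → Int
  | [], _, _ => -1
  | c :: rest, i, count =>
    if String.ofList [c] = char then
      (if count + 1 = n then i else nthAuxA char n rest (i + 1) (count + 1))
    else nthAuxA char n rest (i + 1) count

def nth_occurrence_index (s : String) (char : String) (n : Int) : Int :=
  nthAuxA char n s.toList 0 0

-- ===== PORT B =====
-- hand port of s.find(char, start): exact for a length-1 needle (the only way B calls it)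
def bFindAux (char : String) : List Char → Int → Int
  | [], _ => -1
  | c :: rest, i => if String.ofList [c] = char then i else bFindAux char rest (i + 1)

def bFind (s : String) (char : String) (start : Nat) : Int :=
  bFindAux char (s.toList.drop start) start

-- for _ in range(n): pos = s.find(char, pos + 1); if pos == -1: return -1
def bLoop (s : String) (char : String) : Nat → Int → Int
  | 0, pos => pos
  | k + 1, pos =>
    let p := bFind s char (pos + 1).toNat
    if p = -1 then -1 else bLoop s char k p

def nth_occurrence_index_alt (s : String) (char : String) (n : Int) : Int :=
  if char.toList.length ≠ 1 then -1
  else bLoop s char n.toNat (-1)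

-- ===== PRECONDITION & SPEC =====
def Spec_nth_occurrence_index (s : String) (char : String) (n : Int) (out : Int) : Prop := out = nth_occurrence_index_alt s char n
instance (s : String) (char : String) (n : Int) (out : Int) : Decidable (Spec_nth_occurrence_index s char n out) := by unfold Spec_nth_occurrence_index; infer_instance

-- ===== CLAIM (what is proved, stated in full; the proofs are below) =====
def Claim_equal_nth_occurrence_index : Prop := ∀ (s : String) (char : String) (n : Int), Dom_nth_occurrence_index s char n → Spec_nth_occurrence_index s char n (nth_occurrence_index s char n)

-- ===== LEMMAS AND PROOFS =====

-- the table of all occurrence indices of char in l, starting at index i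
def occList (char : String) : List Char → Int → List Int
  | [], _ => []
  | c :: rest, i =>
    if String.ofList [c] = char then i :: occList char rest (i + 1) else occList char rest (i + 1)

theorem occList_mem_ge (char : String) (l : List Char) (i : Int) :
    ∀ x ∈ occList char l i, i ≤ x := by
  induction l generalizing i with
  | nil => simp [occList]
  | cons c rest ih =>
    intro x hx
    simp only [occList] at hx
    split_ifs at hx with h
    · rcases List.mem_cons.mp hx with rfl | hx'
      · omega
      · have := ih (i + 1) x hx'; omega
    · have := ih (i + 1) x hx; omega

theorem occList_pairwise (char : String) (l : List Char) (i : Int) :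
    (occList char l i).Pairwise (· < ·) := by
  induction l generalizing i with
  | nil => simp [occList]
  | cons c rest ih =>
    simp only [occList]
    split_ifs with h
    · exact List.pairwise_cons.mpr ⟨fun x hx => by have := occList_mem_ge char rest (i + 1) x hx; omega, ih (i + 1)⟩
    · exact ih (i + 1)

theorem occList_empty_of_len (char : String) (hc : char.toList.length ≠ 1) (l : List Char) (i : Int) :
    occList char l i = [] := by
  induction l generalizing i with
  | nil => rfl
  | cons c rest ih =>
    simp only [occList]
    have h : ¬ String.ofList [c] = char := by
      intro h; apply hc; rw [← h]; simp
    rw [if_neg h]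
    exact ih (i + 1)

-- A's scan equals a bounds-guarded lookup in the occurrence table
theorem nthAuxA_eq (char : String) (n : Int) (l : List Char) :
    ∀ (i count : Int),
      nthAuxA char n l i count =
        if 1 ≤ n - count ∧ n - count ≤ ((occList char l i).length : Int) then
          ((occList char l i).getD (n - count - 1).toNat (-1)) else -1 := by
  induction l with
  | nil => intro i count; simp [nthAuxA, occList]
  | cons c rest ih =>
    intro i count
    by_cases hp : String.ofList [c] = char
    · simp only [nthAuxA, occList, hp, if_true]
      by_cases hn : count + 1 = n
      · have h1 : n - count = 1 := by omega
        simp [hn, h1]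
      · rw [if_neg hn, ih (i + 1) (count + 1)]
        by_cases hg : 1 ≤ n - (count + 1) ∧ n - (count + 1) ≤ ((occList char rest (i + 1)).length : Int)
        · rw [if_pos hg]
          have hg' : 1 ≤ n - count ∧ n - count ≤ (((i :: occList char rest (i + 1)).length : Nat) : Int) := by
            simp only [List.length_cons]; push_cast; omega
          rw [if_pos hg']
          have ht : (n - count - 1).toNat = (n - (count + 1) - 1).toNat + 1 := by omega
          rw [ht]
          rfl
        · rw [if_neg hg, if_neg]
          simp only [List.length_cons]
          push_cast
          omega
    · simp only [nthAuxA, occList, hp, if_false]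
      exact ih (i + 1) count

-- bFindAux returns the head of the occurrence table
theorem bFindAux_eq (char : String) (l : List Char) (i : Int) :
    bFindAux char l i = (occList char l i).headD (-1) := by
  induction l generalizing i with
  | nil => rfl
  | cons c rest ih =>
    simp only [bFindAux, occList]
    split_ifs with h
    · rfl
    · exact ih (i + 1)

-- the occurrence table of a dropped prefix is the filtered occurrence table
theorem occList_drop (char : String) (l : List Char) :
    ∀ (k : Nat) (i : Int),
      occList char (l.drop k) (i + k) = (occList char l i).filter (fun x => decide (i + k ≤ x)) := by
  induction l with
  | nil => intro k i; simp [occList]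
  | cons c rest ih =>
    intro k i
    cases k with
    | zero =>
      simp only [List.drop_zero, Int.natCast_zero, add_zero]
      rw [List.filter_eq_self.mpr]
      intro x hx
      simpa using occList_mem_ge char (c :: rest) i x hx
    | succ k' =>
      simp only [List.drop_succ_cons, occList]
      have harith : i + ((k' : Nat) + 1 : Nat) = (i + 1) + (k' : Int) := by push_cast; omega
      split_ifs with h
      · rw [List.filter_cons_of_neg (by simp)]
        rw [harith, ih k' (i + 1)]
      · rw [harith, ih k' (i + 1)]

-- stepping past the head of a filtered sorted list
theorem filter_succ (occ : List Int) (p h : Int) (t' : List Int)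
    (hpw : occ.Pairwise (· < ·))
    (heq : occ.filter (fun x => decide (p ≤ x)) = h :: t') :
    occ.filter (fun x => decide (h + 1 ≤ x)) = t' := by
  induction occ generalizing t' with
  | nil => simp at heq
  | cons a rest ih =>
    have hlt : ∀ x ∈ rest, a < x := (List.pairwise_cons.mp hpw).1
    have hpw' : rest.Pairwise (· < ·) := (List.pairwise_cons.mp hpw).2
    by_cases hpa : p ≤ a
    · rw [List.filter_cons_of_pos (by simpa using hpa)] at heq
      obtain ⟨rfl, ht⟩ := List.cons_eq_cons.mp heq
      rw [List.filter_cons_of_neg (by simp)]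
      have hall : rest.filter (fun x => decide (p ≤ x)) = rest :=
        List.filter_eq_self.mpr (fun x hx => by simp; have := hlt x hx; omega)
      have hall2 : rest.filter (fun x => decide (a + 1 ≤ x)) = rest :=
        List.filter_eq_self.mpr (fun x hx => by simp; have := hlt x hx; omega)
      rw [hall2, ← hall, ht]
    · rw [List.filter_cons_of_neg (by simpa using hpa)] at heq
      have hph : p ≤ h := by
        have : h ∈ rest.filter (fun x => decide (p ≤ x)) := heq ▸ List.mem_cons_self ..
        simpa using (List.mem_filter.mp this).2
      rw [List.filter_cons_of_neg (by simp; omega)]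
      exact ih t' hpw' heq

-- the find-loop invariant: with occurrences ≥ pos+1 being t, k more seeks land on t's k-th entry
theorem bLoop_eq (s : String) (char : String) :
    ∀ (k : Nat) (pos : Int), -1 ≤ pos →
      ∀ t, t = (occList char s.toList 0).filter (fun x => decide (pos + 1 ≤ x)) →
      bLoop s char k pos =
        if k ≤ t.length then (if k = 0 then pos else t.getD (k - 1) (-1)) else -1 := by
  intro k
  induction k with
  | zero => intro pos _ t _; simp [bLoop]
  | succ k' ih =>
    intro pos hpos t ht
    have hk : ((pos + 1).toNat : Int) = pos + 1 := by omega
    have hfind : bFind s char (pos + 1).toNat = t.headD (-1) := by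
      have hdrop := occList_drop char s.toList (pos + 1).toNat 0
      rw [zero_add] at hdrop
      rw [bFind, bFindAux_eq, hdrop, hk, ← ht]
    cases t with
    | nil =>
      simp [bLoop, hfind]
    | cons h t' =>
      have hh0 : 0 ≤ h := by
        have hmem : h ∈ (occList char s.toList 0).filter (fun x => decide (pos + 1 ≤ x)) := by
          rw [← ht]; exact List.mem_cons_self ..
        exact occList_mem_ge char s.toList 0 h (List.mem_filter.mp hmem).1
      have hne : ¬ (h = -1) := by omega
      simp only [bLoop, hfind, List.headD_cons, if_neg hne]
      have ht' : t' = (occList char s.toList 0).filter (fun x => decide (h + 1 ≤ x)) :=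
        (filter_succ _ _ _ _ (occList_pairwise char s.toList 0) ht.symm).symm
      rw [ih h (by omega) t' ht']
      by_cases hlen : k' ≤ t'.length
      · rw [if_pos hlen, if_pos (show k' + 1 ≤ (h :: t').length by simp; omega)]
        cases k' with
        | zero => simp
        | succ m => simp
      · rw [if_neg hlen, if_neg (show ¬ (k' + 1 ≤ (h :: t').length) by simp; omega)]

theorem nth_occurrence_index_eq_alt (s : String) (char : String) (n : Int) :
    nth_occurrence_index s char n = nth_occurrence_index_alt s char n := by
  unfold nth_occurrence_index nth_occurrence_index_alt
  rw [show nthAuxA char n s.toList 0 0 = _ from nthAuxA_eq char n s.toList 0 0]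
  by_cases hc : char.toList.length ≠ 1
  · rw [if_pos hc, occList_empty_of_len char hc]
    simp
  · rw [if_neg hc]
    have hocc : (occList char s.toList 0).filter (fun x => decide ((-1 : Int) + 1 ≤ x)) =
        occList char s.toList 0 :=
      List.filter_eq_self.mpr (fun x hx => by
        simpa using occList_mem_ge char s.toList 0 x hx)
    rw [bLoop_eq s char n.toNat (-1) (by omega) (occList char s.toList 0) hocc.symm]
    set occ := occList char s.toList 0 with hoccdef
    by_cases hg : 1 ≤ n - 0 ∧ n - 0 ≤ (occ.length : Int)
    · rw [if_pos hg, if_pos (by omega), if_neg (by omega)]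
      congr 1
      omega
    · rw [if_neg hg]
      by_cases hn0 : n ≤ 0
      · rw [if_pos (by omega), if_pos (by omega)]
      · rw [if_neg (by omega)]

-- ===== VERDICT (by name: the statement is the Claim_ definition above) =====
theorem nth_occurrence_index_spec : Claim_equal_nth_occurrence_index := by
  intro s char n _
  exact nth_occurrence_index_eq_alt s char n
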